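-- pv_equiv track=rewrite | github.com/MatthewScholefield/yorpo | yorpo.py | _fence_for
-- ===== SOURCE A (Python) =====
-- def _fence_for(content: str) -> str:
--     """Return the shortest backtick fence that does not appear in content."""
--     max_run = 0
--     run = 0
--     for ch in content:
--         if ch == '`':
--             run += 1
--             max_run = max(max_run, run)
--         else:
--             run = 0
--     return '`' * max(3, max_run + 1)
-- ===== SOURCE B (Python) =====
-- def _fence_for(content: str) -> str:
--     """Return the shortest backtick fence that does not appear in content."""
--     fence = '```'
--     while fence in content:
--         fence += '`'
--     return fence
-- ===== Notes on version B (the rewrite author's own statement) =====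
-- stated objective: idiomatic
-- what changed: Replaced the char-by-char running-max counter (then building the fence from the max run) by a candidate search: start from the three-backtick fence and grow it by one backtick while it still occurs as a substring of the content.
import Mathlib
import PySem

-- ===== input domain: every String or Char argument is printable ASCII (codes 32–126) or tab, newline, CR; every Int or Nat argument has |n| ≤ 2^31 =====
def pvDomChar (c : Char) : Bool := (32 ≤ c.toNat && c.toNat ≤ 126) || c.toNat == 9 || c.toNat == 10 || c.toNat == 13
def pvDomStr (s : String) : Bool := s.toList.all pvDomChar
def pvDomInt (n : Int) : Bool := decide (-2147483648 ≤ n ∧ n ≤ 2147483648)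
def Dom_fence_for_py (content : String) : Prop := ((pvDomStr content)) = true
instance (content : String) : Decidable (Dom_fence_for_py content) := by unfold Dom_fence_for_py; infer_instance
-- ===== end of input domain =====

-- B replaces A's char-by-char running-max counter with the idiomatic loop that grows
-- the candidate fence from '```' while it still occurs as a substring (objective: idiomatic).


-- ===== PORT A =====
-- for ch in content: running counters max_run, run; then '`' * max(3, max_run + 1)
def fence_for_py (content : String) : String :=
  String.mk (PySem.List.pyRepeat ['`'] (max 3 ((content.toList.foldl
    (fun (p : Int × Int) ch =>
      if ch = '`' then (max p.1 (p.2 + 1), p.2 + 1) else (p.1, 0))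
    (0, 0)).1 + 1)))

-- ===== PORT B =====
-- while fence in content: fence += '`'  (terminates: a fence longer than content never occurs in it)
def fenceGrow (content : List Char) (fence : List Char) : List Char :=
  if h : PySem.Chars.isIn fence content = true then
    fenceGrow content (fence ++ ['`'])
  else fence
termination_by content.length + 1 - fence.length
decreasing_by
  have h' := (PySem.Chars.exists_prefix_drop_iff_isIn fence content).2 h
  obtain ⟨j, hj⟩ := h'
  have := hj.length_le
  have := List.length_drop (l := content) (i := j)
  simp only [List.length_append, List.length_cons, List.length_nil]
  omega

def fence_for_py_alt (content : String) : String :=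
  String.mk (fenceGrow content.toList ['`', '`', '`'])

-- ===== PRECONDITION & SPEC =====
def Spec_fence_for_py (content : String) (out : String) : Prop := out = fence_for_py_alt content
instance (content : String) (out : String) : Decidable (Spec_fence_for_py content out) := by unfold Spec_fence_for_py; infer_instance

-- ===== CLAIM (what is proved, stated in full; the proofs are below) =====
def Claim_equal_fence_for_py : Prop := ∀ (content : String), Dom_fence_for_py content → Spec_fence_for_py content (fence_for_py content)

-- ===== LEMMAS AND PROOFS =====

-- length of the leading backtick run
def leadRun : List Char → Nat
  | [] => 0
  | c :: cs => if c = '`' then leadRun cs + 1 else 0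

-- state machine over Nat: final max run, given pending run r
def mrN : List Char → Nat → Nat
  | [], r => r
  | c :: cs, r => if c = '`' then mrN cs (r + 1) else max r (mrN cs 0)

lemma mrN_eq (l : List Char) (r : Nat) :
    mrN l r = max (r + leadRun l) (mrN l 0) := by
  induction l generalizing r with
  | nil => simp [mrN, leadRun]
  | cons c cs ih =>
    simp only [mrN, leadRun]
    split
    · rw [ih (r + 1), ih 1]
      omega
    · simp

lemma replicate_prefix_iff (l : List Char) (k : Nat) :
    List.replicate k '`' <+: l ↔ k ≤ leadRun l := by
  induction l generalizing k with
  | nil =>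
    cases k with
    | zero => simp [leadRun]
    | succ n => simp [List.replicate_succ, leadRun]
  | cons c cs ih =>
    cases k with
    | zero => simp
    | succ n =>
      simp only [List.replicate_succ, List.cons_prefix_cons, leadRun]
      constructor
      · rintro ⟨rfl, h⟩
        rw [if_pos rfl]
        exact Nat.succ_le_succ ((ih n).1 h)
      · intro h
        by_cases hc : c = '`'
        · subst hc
          refine ⟨rfl, (ih n).2 ?_⟩
          rw [if_pos rfl] at h
          omega
        · simp [hc] at h
      
lemma replicate_infix_iff (l : List Char) (k : Nat) :
    List.replicate k '`' <:+: l ↔ k ≤ mrN l 0 := by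
  induction l with
  | nil =>
    cases k with
    | zero => simp [mrN]
    | succ n => simp [List.replicate_succ, mrN]
  | cons c cs ih =>
    rw [List.infix_cons_iff, ih, replicate_prefix_iff]
    simp only [mrN, leadRun]
    by_cases hc : c = '`'
    · simp only [if_pos hc]
      rw [mrN_eq cs 1]
      omega
    · simp only [if_neg hc]
      omega

lemma isIn_iff_infix (sub l : List Char) :
    PySem.Chars.isIn sub l = true ↔ sub <:+: l := by
  rw [← PySem.Chars.exists_prefix_drop_iff_isIn]
  constructor
  · rintro ⟨j, hj⟩
    exact hj.isInfix.trans (List.drop_suffix j l).isInfix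
  · rintro ⟨a, b, rfl⟩
    exact ⟨a.length, by simp⟩

lemma fenceGrow_eq (l : List Char) (k : Nat) (hk : 1 ≤ k) :
    fenceGrow l (List.replicate k '`') = List.replicate (max k (mrN l 0 + 1)) '`' := by
  by_cases h : k ≤ mrN l 0
  · have hrec : fenceGrow l (List.replicate k '`')
        = fenceGrow l (List.replicate (k + 1) '`') := by
      rw [fenceGrow]
      rw [dif_pos (by
        rw [isIn_iff_infix, replicate_infix_iff]; exact h)]
      rw [List.replicate_succ']
    rw [hrec, fenceGrow_eq l (k + 1) (by omega)]
    congr 1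
    omega
  · rw [fenceGrow]
    rw [dif_neg (by
      rw [isIn_iff_infix, replicate_infix_iff]; omega)]
    congr 1
    omega
termination_by mrN l 0 + 1 - k

-- Int state machine, mirroring A's fold
def mrI : List Char → Int → Int
  | [], r => r
  | c :: cs, r => if c = '`' then mrI cs (r + 1) else max r (mrI cs 0)

lemma le_mrI (l : List Char) (r : Int) : r ≤ mrI l r := by
  induction l generalizing r with
  | nil => simp [mrI]
  | cons c cs ih =>
    simp only [mrI]
    split
    · exact le_trans (by omega) (ih (r + 1))
    · exact le_max_left _ _

lemma foldA_eq (l : List Char) (m r : Int) (h0 : 0 ≤ r) (hrm : r ≤ m) :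
    (l.foldl (fun (p : Int × Int) ch =>
      if ch = '`' then (max p.1 (p.2 + 1), p.2 + 1) else (p.1, 0)) (m, r)).1
    = max m (mrI l r) := by
  induction l generalizing m r with
  | nil =>
    simp only [List.foldl_nil, mrI]
    omega
  | cons c cs ih =>
    simp only [List.foldl_cons, mrI]
    by_cases hc : c = '`'
    · simp only [if_pos hc]
      rw [ih (max m (r + 1)) (r + 1) (by omega) (le_max_right _ _)]
      have := le_mrI cs (r + 1)
      omega
    · simp only [if_neg hc]
      rw [ih m 0 le_rfl (by omega)]
      have := le_mrI cs (0 : Int)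
      omega

lemma mrI_cast (l : List Char) (r : Nat) : mrI l (r : Int) = (mrN l r : Int) := by
  induction l generalizing r with
  | nil => simp [mrI, mrN]
  | cons c cs ih =>
    simp only [mrI, mrN]
    split
    · rw [show ((r : Int) + 1) = ((r + 1 : Nat) : Int) by push_cast; ring, ih]
    · rw [show ((0 : Int)) = ((0 : Nat) : Int) by norm_num, ih]
      omega

-- ===== VERDICT (by name: the statement is the Claim_ definition above) =====
theorem fence_for_py_spec : Claim_equal_fence_for_py := by
  intro content _
  unfold Spec_fence_for_py fence_for_py fence_for_py_alt
  rw [foldA_eq content.toList 0 0 le_rfl le_rfl]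
  rw [show ((0 : Int)) = ((0 : Nat) : Int) by norm_num, mrI_cast]
  rw [show (['`', '`', '`'] : List Char) = List.replicate 3 '`' by rfl]
  rw [fenceGrow_eq content.toList 3 (by omega)]
  rw [PySem.List.pyRepeat_singleton]
  congr 1
  congr 1
  omega
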